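-- pv_equiv track=rewrite | github.com/kezhu100/AI-sheet-music-generator | apps/api/app/services/musicxml_export.py | _split_duration
-- ===== SOURCE A (Python) =====
-- def _split_duration(duration_divisions: int) -> list[int]:
--     chunks: list[int] = []
--     remaining = duration_divisions
--     supported = [16, 12, 8, 6, 4, 3, 2, 1]
--
--     while remaining > 0:
--         for value in supported:
--             if value <= remaining:
--                 chunks.append(value)
--                 remaining -= value
--                 break
--
--     return chunks
-- ===== SOURCE B (Python) =====
-- _TAIL = [[], [1], [2], [3], [4], [4, 1], [6], [6, 1],
--          [8], [8, 1], [8, 2], [8, 3], [12], [12, 1], [12, 2], [12, 3]]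
--
-- def _split_duration(duration_divisions: int) -> list[int]:
--     if duration_divisions <= 0:
--         return []
--     q, r = divmod(duration_divisions, 16)
--     return [16] * q + _TAIL[r]
-- ===== Notes on version B (the rewrite author's own statement) =====
-- stated objective: faster
-- what changed: Replaced the repeated largest-first scan loop by a divmod split into 16-chunks plus a precomputed 16-entry tail table for the remainder.
import Mathlib
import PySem

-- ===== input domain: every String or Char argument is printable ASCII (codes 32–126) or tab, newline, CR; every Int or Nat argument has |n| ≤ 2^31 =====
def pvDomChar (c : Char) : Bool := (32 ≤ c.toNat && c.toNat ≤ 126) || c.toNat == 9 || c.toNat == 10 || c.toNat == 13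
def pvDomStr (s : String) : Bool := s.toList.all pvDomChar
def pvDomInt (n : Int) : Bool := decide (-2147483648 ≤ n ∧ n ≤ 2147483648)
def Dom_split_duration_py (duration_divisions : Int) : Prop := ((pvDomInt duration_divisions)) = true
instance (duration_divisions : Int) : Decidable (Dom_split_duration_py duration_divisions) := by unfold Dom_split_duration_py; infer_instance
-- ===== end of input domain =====

-- B replaces A's repeated largest-first greedy loop by a divmod into 16-chunks plus a fixed remainder table (faster: no per-chunk scan).

-- ===== PORT A =====
-- the inner 'for value in supported: if value <= remaining: … break' picks the first
-- supported value ≤ remaining; transliterated as the same ordered chain of tests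
def pvPickA (remaining : Int) : Int :=
  if 16 ≤ remaining then 16
  else if 12 ≤ remaining then 12
  else if 8 ≤ remaining then 8
  else if 6 ≤ remaining then 6
  else if 4 ≤ remaining then 4
  else if 3 ≤ remaining then 3
  else if 2 ≤ remaining then 2
  else 1

theorem pvPickA_pos (r : Int) : 1 ≤ pvPickA r := by
  unfold pvPickA; split_ifs <;> omega

theorem pvPickA_le (r : Int) (h : 0 < r) : pvPickA r ≤ r := by
  unfold pvPickA; split_ifs <;> omega

-- the outer while loop; terminates because each iteration removes the picked value ≥ 1
def pvLoopA (remaining : Int) : List Int :=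
  if h : 0 < remaining then
    pvPickA remaining :: pvLoopA (remaining - pvPickA remaining)
  else []
termination_by remaining.toNat
decreasing_by
  have h1 := pvPickA_pos remaining
  have h2 := pvPickA_le remaining h
  omega

def split_duration_py (duration_divisions : Int) : List Int :=
  pvLoopA duration_divisions

-- ===== PORT B =====
def pvTail : List (List Int) :=
  [[], [1], [2], [3], [4], [4, 1], [6], [6, 1],
   [8], [8, 1], [8, 2], [8, 3], [12], [12, 1], [12, 2], [12, 3]]

def split_duration_py_alt (duration_divisions : Int) : List Int :=
  if duration_divisions ≤ 0 then []
  else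
    let q := PySem.Int.floordiv duration_divisions 16
    let r := PySem.Int.mod duration_divisions 16
    List.replicate q.toNat 16 ++ pvTail.getD r.toNat []

-- ===== PRECONDITION & SPEC =====
def Spec_split_duration_py (duration_divisions : Int) (out : List Int) : Prop := out = split_duration_py_alt duration_divisions
instance (duration_divisions : Int) (out : List Int) : Decidable (Spec_split_duration_py duration_divisions out) := by unfold Spec_split_duration_py; infer_instance

-- ===== CLAIM (what is proved, stated in full; the proofs are below) =====
def Claim_equal_split_duration_py : Prop := ∀ (duration_divisions : Int), Dom_split_duration_py duration_divisions → Spec_split_duration_py duration_divisions (split_duration_py duration_divisions)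

-- ===== LEMMAS AND PROOFS =====

theorem alt_nonpos (d : Int) (h : d ≤ 0) : split_duration_py_alt d = [] := by
  simp [split_duration_py_alt, h]

theorem alt_ge16 (d : Int) (h : 16 ≤ d) :
    split_duration_py_alt d = 16 :: split_duration_py_alt (d - 16) := by
  have h0 : ¬ d ≤ 0 := by omega
  have hq : PySem.Int.floordiv d 16 = PySem.Int.floordiv (d - 16) 16 + 1 := by
    rw [PySem.Int.floordiv_eq_ediv_of_pos (by norm_num : (0:Int) < 16),
        PySem.Int.floordiv_eq_ediv_of_pos (by norm_num : (0:Int) < 16)]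
    omega
  have hr : PySem.Int.mod d 16 = PySem.Int.mod (d - 16) 16 := by
    rw [PySem.Int.mod_eq_emod_of_pos (by norm_num : (0:Int) < 16),
        PySem.Int.mod_eq_emod_of_pos (by norm_num : (0:Int) < 16)]
    omega
  have hqpos : 0 ≤ PySem.Int.floordiv (d - 16) 16 := by
    rw [PySem.Int.floordiv_eq_ediv_of_pos (by norm_num : (0:Int) < 16)]
    exact Int.ediv_nonneg (by omega) (by norm_num)
  by_cases h16 : d - 16 ≤ 0
  · have hd : d = 16 := by omega
    subst hd
    decide
  · simp only [split_duration_py_alt, if_neg h0, if_neg h16, hq, hr]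
    have hrep : (PySem.Int.floordiv (d - 16) 16 + 1).toNat
        = (PySem.Int.floordiv (d - 16) 16).toNat + 1 := by omega
    rw [hrep, List.replicate_succ]
    simp

theorem loop_eq_alt (d : Int) : pvLoopA d = split_duration_py_alt d := by
  by_cases hpos : 0 < d
  · by_cases hbig : 16 ≤ d
    · rw [pvLoopA]
      have hp : pvPickA d = 16 := by unfold pvPickA; simp [hbig]
      rw [dif_pos hpos, hp, alt_ge16 d hbig]
      exact congrArg _ (loop_eq_alt (d - 16))
    · -- 1 ≤ d ≤ 15: finite case check
      interval_cases d <;>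
        · rw [pvLoopA]
          norm_num [pvPickA]
          repeat (rw [pvLoopA]; norm_num [pvPickA])
          decide
  · rw [pvLoopA, dif_neg hpos, alt_nonpos d (by omega)]
termination_by d.toNat
decreasing_by omega

-- ===== VERDICT (by name: the statement is the Claim_ definition above) =====
theorem split_duration_py_spec : Claim_equal_split_duration_py := by
  intro d _
  unfold Spec_split_duration_py split_duration_py
  exact loop_eq_alt d
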